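-- pv_equiv track=rewrite | github.com/witblack/G3nius-Tools-Sploit | G3nius-Tools/lib/GPL/String_Workers.py | gpl_fix_string_to_uri
-- ===== SOURCE A (Python) =====
-- def gpl_fix_string_to_uri(URI, fix_for_without_double_quotation=False):
--     URI = URI.replace("\\", "\\\\")
--     Charecters = ['"', '!', '$', '`']
--     for Charecter in Charecters:
--         URI = URI.replace(Charecter, '\\' + Charecter)
--     if fix_for_without_double_quotation:
--         Charecters = ["'", '&', ';', '|', '(', ')', '%', '$', '*', '?', '>', '[', ']', '`']
--         for Charecter in Charecters:
--             URI = URI.replace(Charecter, "\\" + Charecter)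
--     return URI
-- ===== SOURCE B (Python) =====
-- def gpl_fix_string_to_uri(URI, fix_for_without_double_quotation=False):
--     def esc(c):
--         if c == '\\':
--             return '\\\\'
--         if c in '"!$`':
--             if fix_for_without_double_quotation and c in '$`':
--                 return '\\\\' + c
--             return '\\' + c
--         if fix_for_without_double_quotation and c in "'&;|()%*?>[]":
--             return '\\' + c
--         return c
--     return ''.join(map(esc, URI))
-- ===== Notes on version B (the rewrite author's own statement) =====
-- stated objective: alternative
-- what changed: Replaced A's sequence of whole-string replace passes (one per special character) by a single left-to-right pass that escapes each character independently via one per-character escape rule (with the double escape for '$' and '`' under the flag folded into the rule).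
import Mathlib
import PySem

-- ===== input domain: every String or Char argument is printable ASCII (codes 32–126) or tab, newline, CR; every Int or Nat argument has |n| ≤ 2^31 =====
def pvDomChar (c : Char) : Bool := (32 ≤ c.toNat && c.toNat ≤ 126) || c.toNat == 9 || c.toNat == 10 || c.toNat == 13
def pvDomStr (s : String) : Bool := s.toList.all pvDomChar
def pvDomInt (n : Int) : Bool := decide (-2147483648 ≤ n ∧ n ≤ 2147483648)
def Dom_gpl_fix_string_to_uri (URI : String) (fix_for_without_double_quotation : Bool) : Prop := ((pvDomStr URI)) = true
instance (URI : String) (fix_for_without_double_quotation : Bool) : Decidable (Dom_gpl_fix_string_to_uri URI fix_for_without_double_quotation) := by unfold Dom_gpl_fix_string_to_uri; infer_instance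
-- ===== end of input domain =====

-- B replaces A's repeated whole-string .replace passes by one per-character escape pass (alternative decomposition, same cost class).

-- ===== PORT A =====
def gpl_fix_string_to_uri (URI : String) (fix_for_without_double_quotation : Bool) : String :=
  let u1 := PySem.Str.replace URI "\\" "\\\\"
  let u2 := (["\"", "!", "$", "`"] : List String).foldl
              (fun u ch => PySem.Str.replace u ch ("\\" ++ ch)) u1
  if fix_for_without_double_quotation then
    (["'", "&", ";", "|", "(", ")", "%", "$", "*", "?", ">", "[", "]", "`"] : List String).foldl
      (fun u ch => PySem.Str.replace u ch ("\\" ++ ch)) u2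
  else u2

-- ===== PORT B =====
-- Source B's esc(c): one escape rule per character (strings as their char lists)
def pvEscB (fix : Bool) (c : Char) : List Char :=
  if c = '\\' then ['\\', '\\']
  else if ("\"!$`".toList).contains c then
    if fix && ("$`".toList).contains c then ['\\', '\\', c] else ['\\', c]
  else if fix && ("'&;|()%*?>[]".toList).contains c then ['\\', c]
  else [c]

-- ''.join(map(esc, URI))
def gpl_fix_string_to_uri_alt (URI : String) (fix_for_without_double_quotation : Bool) : String :=
  String.ofList ((URI.toList.map (pvEscB fix_for_without_double_quotation)).flatten)

-- ===== PRECONDITION & SPEC =====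
def Spec_gpl_fix_string_to_uri (URI : String) (fix_for_without_double_quotation : Bool) (out : String) : Prop := out = gpl_fix_string_to_uri_alt URI fix_for_without_double_quotation
instance (URI : String) (fix_for_without_double_quotation : Bool) (out : String) : Decidable (Spec_gpl_fix_string_to_uri URI fix_for_without_double_quotation out) := by unfold Spec_gpl_fix_string_to_uri; infer_instance

-- ===== CLAIM (what is proved, stated in full; the proofs are below) =====
def Claim_equal_gpl_fix_string_to_uri : Prop := ∀ (URI : String) (fix_for_without_double_quotation : Bool), Dom_gpl_fix_string_to_uri URI fix_for_without_double_quotation → Spec_gpl_fix_string_to_uri URI fix_for_without_double_quotation (gpl_fix_string_to_uri URI fix_for_without_double_quotation)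

-- ===== LEMMAS AND PROOFS =====

-- replace with a single-char pattern is a per-character flatMap
lemma pv_go_single (c : Char) (new : List Char) :
    ∀ (l acc : List Char),
      PySem.Chars.replace.go [c] new l.length l acc
        = acc.reverse ++ l.flatMap (fun x => if x = c then new else [x]) := by
  intro l
  induction l with
  | nil => intro acc; simp [PySem.Chars.replace.go]
  | cons x t ih =>
      intro acc
      by_cases hx : x = c
      · subst hx
        simp [PySem.Chars.replace.go, List.isPrefixOf, ih]
      · simp [PySem.Chars.replace.go, List.isPrefixOf, hx, ih, Ne.symm hx]

lemma pv_replace_single (s : List Char) (c : Char) (new : List Char) :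
    PySem.Chars.replace s [c] new = s.flatMap (fun x => if x = c then new else [x]) := by
  simpa using pv_go_single c new s []

lemma pv_branch_false (URI : String) :
    gpl_fix_string_to_uri URI false = gpl_fix_string_to_uri_alt URI false := by
  unfold gpl_fix_string_to_uri gpl_fix_string_to_uri_alt
  simp only [List.foldl, Bool.false_eq_true, if_false]
  refine (String.ofList_toList.symm).trans (congrArg String.ofList ?_)
  simp only [PySem.Str.toList_replace]
  rw [show ("\\" : String).toList = ['\\'] from rfl,
      show ("\\\\" : String).toList = ['\\', '\\'] from rfl,
      show ("\"" : String).toList = ['"'] from rfl,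
      show ("!" : String).toList = ['!'] from rfl,
      show ("$" : String).toList = ['$'] from rfl,
      show ("`" : String).toList = ['`'] from rfl,
      show (("\\" : String) ++ "\"").toList = ['\\', '"'] from rfl,
      show (("\\" : String) ++ "!").toList = ['\\', '!'] from rfl,
      show (("\\" : String) ++ "$").toList = ['\\', '$'] from rfl,
      show (("\\" : String) ++ "`").toList = ['\\', '`'] from rfl]
  simp only [pv_replace_single, List.flatMap_assoc, ← List.flatMap_def]
  refine List.flatMap_congr (fun c _ => ?_)
  by_cases h0 : c = '\\'
  · subst h0; decide
  by_cases h1 : c = '"'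
  · subst h1; decide
  by_cases h2 : c = '!'
  · subst h2; decide
  by_cases h3 : c = '$'
  · subst h3; decide
  by_cases h4 : c = '`'
  · subst h4; decide
  simp [pvEscB, h0, h1, h2, h3, h4]

lemma pv_branch_true (URI : String) :
    gpl_fix_string_to_uri URI true = gpl_fix_string_to_uri_alt URI true := by
  unfold gpl_fix_string_to_uri gpl_fix_string_to_uri_alt
  simp only [List.foldl, if_true]
  refine (String.ofList_toList.symm).trans (congrArg String.ofList ?_)
  simp only [PySem.Str.toList_replace]
  rw [show ("\\" : String).toList = ['\\'] from rfl,
      show ("\\\\" : String).toList = ['\\', '\\'] from rfl,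
      show ("\"" : String).toList = ['"'] from rfl,
      show ("!" : String).toList = ['!'] from rfl,
      show ("$" : String).toList = ['$'] from rfl,
      show ("`" : String).toList = ['`'] from rfl,
      show ("'" : String).toList = ['\''] from rfl,
      show ("&" : String).toList = ['&'] from rfl,
      show (";" : String).toList = [';'] from rfl,
      show ("|" : String).toList = ['|'] from rfl,
      show ("(" : String).toList = ['('] from rfl,
      show (")" : String).toList = [')'] from rfl,
      show ("%" : String).toList = ['%'] from rfl,
      show ("*" : String).toList = ['*'] from rfl,
      show ("?" : String).toList = ['?'] from rfl,
      show (">" : String).toList = ['>'] from rfl,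
      show ("[" : String).toList = ['['] from rfl,
      show ("]" : String).toList = [']'] from rfl,
      show (("\\" : String) ++ "\"").toList = ['\\', '"'] from rfl,
      show (("\\" : String) ++ "!").toList = ['\\', '!'] from rfl,
      show (("\\" : String) ++ "$").toList = ['\\', '$'] from rfl,
      show (("\\" : String) ++ "`").toList = ['\\', '`'] from rfl,
      show (("\\" : String) ++ "'").toList = ['\\', '\''] from rfl,
      show (("\\" : String) ++ "&").toList = ['\\', '&'] from rfl,
      show (("\\" : String) ++ ";").toList = ['\\', ';'] from rfl,
      show (("\\" : String) ++ "|").toList = ['\\', '|'] from rfl,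
      show (("\\" : String) ++ "(").toList = ['\\', '('] from rfl,
      show (("\\" : String) ++ ")").toList = ['\\', ')'] from rfl,
      show (("\\" : String) ++ "%").toList = ['\\', '%'] from rfl,
      show (("\\" : String) ++ "*").toList = ['\\', '*'] from rfl,
      show (("\\" : String) ++ "?").toList = ['\\', '?'] from rfl,
      show (("\\" : String) ++ ">").toList = ['\\', '>'] from rfl,
      show (("\\" : String) ++ "[").toList = ['\\', '['] from rfl,
      show (("\\" : String) ++ "]").toList = ['\\', ']'] from rfl]
  simp only [pv_replace_single, List.flatMap_assoc, ← List.flatMap_def]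
  refine List.flatMap_congr (fun c _ => ?_)
  by_cases h0 : c = '\\'
  · subst h0; decide
  by_cases h1 : c = '"'
  · subst h1; decide
  by_cases h2 : c = '!'
  · subst h2; decide
  by_cases h3 : c = '$'
  · subst h3; decide
  by_cases h4 : c = '`'
  · subst h4; decide
  by_cases h5 : c = '\''
  · subst h5; decide
  by_cases h6 : c = '&'
  · subst h6; decide
  by_cases h7 : c = ';'
  · subst h7; decide
  by_cases h8 : c = '|'
  · subst h8; decide
  by_cases h9 : c = '('
  · subst h9; decide
  by_cases h10 : c = ')'
  · subst h10; decide
  by_cases h11 : c = '%'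
  · subst h11; decide
  by_cases h12 : c = '*'
  · subst h12; decide
  by_cases h13 : c = '?'
  · subst h13; decide
  by_cases h14 : c = '>'
  · subst h14; decide
  by_cases h15 : c = '['
  · subst h15; decide
  by_cases h16 : c = ']'
  · subst h16; decide
  simp [pvEscB, h0, h1, h2, h3, h4, h5, h6, h7, h8, h9, h10, h11, h12, h13, h14, h15, h16]

-- ===== VERDICT (by name: the statement is the Claim_ definition above) =====
theorem gpl_fix_string_to_uri_spec : Claim_equal_gpl_fix_string_to_uri := by
  intro URI fix _
  unfold Spec_gpl_fix_string_to_uri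
  cases fix
  · exact pv_branch_false URI
  · exact pv_branch_true URI
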